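-- pv_equiv track=rewrite | github.com/tmpa1982/aoc2025 | day6/cephalopod.py | solve
-- ===== SOURCE A (Python) =====
-- def calculate(numbers: list[int], operation: str):
--     match operation:
--         case "*":
--             return multiply(numbers)
--         case "+":
--             return add(numbers)
--         case _:
--             raise(ValueError(f"Invalid operation: {operation}"))
--
-- def multiply(numbers: list[int]):
--     result = 1
--     for number in numbers:
--         result = result * number
--     return result
--
-- def add(numbers: list[int]):
--     result = 0
--     for number in numbers:
--         result = result + number
--     return result
--
-- def solve(input: list[str]):
--     parsed_numbers = []
--     for row in input[:-1]:
--         parsed = parse_number_row(row)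
--         parsed_numbers.append(parsed)
--
--     operation = [i for i in input[-1].split(" ") if i]
--
--     result = 0
--     for i in range(0, len(operation)):
--         numbers = get_numbers(parsed_numbers, i)
--         op = operation[i]
--         col_result = calculate(numbers, op)
--         result = result + col_result
--
--     return result
--
-- def parse_number_row(s: str):
--     return [int(i) for i in s.split(" ") if i]
--
-- def get_numbers(parsed: list[list[int]], index):
--     result = []
--     for l in parsed:
--         result.append(l[index])
--     return result
-- ===== SOURCE B (Python) =====
-- def _init(op):
--     if op == "*":
--         return 1
--     if op == "+":
--         return 0
--     raise ValueError(f"Invalid operation: {op}")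
--
-- def parse_number_row(s: str):
--     return [int(t) for t in s.split(" ") if t]
--
-- def solve(input: list[str]):
--     rows = [parse_number_row(r) for r in input[:-1]]
--     ops = [t for t in input[-1].split(" ") if t]
--     acc = [_init(op) for op in ops]
--     for row in rows:
--         acc = [a * x if op == "*" else a + x for a, x, op in zip(acc, row, ops)]
--     return sum(acc)
-- ===== Notes on version B (the rewrite author's own statement) =====
-- stated objective: alternative
-- what changed: Replaces the per-column re-extraction (get_numbers scanning all rows for each operation index) plus multiply/add helpers by a single row-major pass maintaining one running accumulator per column (initialized 1 for '*', 0 for '+'), summed at the end.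
import Mathlib
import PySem

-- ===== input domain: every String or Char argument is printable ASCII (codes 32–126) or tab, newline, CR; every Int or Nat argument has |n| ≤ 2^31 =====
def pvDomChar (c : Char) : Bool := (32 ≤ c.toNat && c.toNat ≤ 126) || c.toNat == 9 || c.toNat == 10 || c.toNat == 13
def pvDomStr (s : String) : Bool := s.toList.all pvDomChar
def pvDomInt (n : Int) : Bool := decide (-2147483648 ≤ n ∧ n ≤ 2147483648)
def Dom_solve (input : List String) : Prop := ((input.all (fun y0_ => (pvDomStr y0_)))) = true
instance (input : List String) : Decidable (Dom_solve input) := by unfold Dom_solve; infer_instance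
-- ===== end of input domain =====

-- B replaces A's per-column re-extraction (get_numbers + multiply/add) by one row-major pass
-- maintaining a running accumulator per operation column; same cost, different decomposition.

-- ===== PORT A =====
-- tokens of s.split(" ") with empties filtered (the '[i for i in s.split(" ") if i]' pattern)
def pvTokens (s : String) : List String :=
  ((PySem.Str.split? s " ").getD []).filter (fun t => t ≠ "")

-- parse_number_row; int(t) raises ValueError when ofStr? = none — excluded by Pre_solve
def pvParseRow (s : String) : List Int :=
  (pvTokens s).map (fun t => (PySem.Int.ofStr? t).getD 0)

def pvMultiply (numbers : List Int) : Int := numbers.foldl (fun r n => r * n) 1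
def pvAdd (numbers : List Int) : Int := numbers.foldl (fun r n => r + n) 0

-- calculate; the final case raises ValueError in Python — excluded by Pre_solve
def pvCalculate (numbers : List Int) (operation : String) : Int :=
  if operation = "*" then pvMultiply numbers
  else if operation = "+" then pvAdd numbers
  else 0

-- get_numbers; l[index] raises IndexError when out of range — excluded by Pre_solve
def pvGetNumbers (parsed : List (List Int)) (index : Int) : List Int :=
  parsed.foldl (fun result l => result ++ [PySem.List.pyGetD l index 0]) []

def solve (input : List String) : Int :=
  let parsed_numbers :=
    (PySem.List.slice input none (some (-1))).foldl
      (fun acc row => acc ++ [pvParseRow row]) []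
  let operation := pvTokens (PySem.List.pyGetD input (-1) "")
  (PySem.List.pyRange 0 (operation.length : Int) 1).foldl
    (fun result i =>
      result + pvCalculate (pvGetNumbers parsed_numbers i) (PySem.List.pyGetD operation i "")) 0

-- ===== PORT B =====
-- _init; any other token raises ValueError in Python — excluded by Pre_solve
def pvInit (op : String) : Int := if op = "*" then 1 else 0

def solve_alt (input : List String) : Int :=
  let rows := (PySem.List.slice input none (some (-1))).map pvParseRow
  let ops := pvTokens (PySem.List.pyGetD input (-1) "")
  let acc0 := ops.map pvInit
  (rows.foldl
    (fun acc row =>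
      (acc.zip (row.zip ops)).map (fun p => if p.2.2 = "*" then p.1 * p.2.1 else p.1 + p.2.1))
    acc0).sum

-- ===== PRECONDITION & SPEC =====
-- Exactly the inputs where the Python A returns: input nonempty (input[-1] would raise IndexError),
-- every data-row token a valid int literal (int() would raise ValueError), every operation token
-- "*" or "+" (calculate would raise ValueError), and every data row at least as long as the
-- operation row (l[index] would raise IndexError).
def Pre_solve (input : List String) : Prop :=
  input ≠ [] ∧
  (∀ s ∈ input.dropLast, ∀ t ∈ pvTokens s, (PySem.Int.ofStr? t).isSome) ∧
  (∀ op ∈ pvTokens (input.getLastD ""), op = "*" ∨ op = "+") ∧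
  (∀ s ∈ input.dropLast, (pvTokens (input.getLastD "")).length ≤ (pvTokens s).length)
instance (input : List String) : Decidable (Pre_solve input) := by unfold Pre_solve; infer_instance

def pvWitness_solve : List String := ["1 2", "3 4", "* +"]

def Spec_solve (input : List String) (out : Int) : Prop := out = solve_alt input
instance (input : List String) (out : Int) : Decidable (Spec_solve input out) := by unfold Spec_solve; infer_instance

-- ===== CLAIM (what is proved, stated in full; the proofs are below) =====
def Claim_equal_solve : Prop := ∀ (input : List String), Dom_solve input → Pre_solve input → Spec_solve input (solve input)

-- ===== LEMMAS AND PROOFS =====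

theorem pvGetLast_eq_getLastD (l : List String) (h : l ≠ []) :
    l.getLast h = l.getLastD "" := by
  simp [List.getLastD_eq_getLast?, List.getLast?_eq_some_getLast h]

-- per-column combining step, as B's comprehension writes it
def pvCombine (op : String) (a x : Int) : Int := if op = "*" then a * x else a + x

theorem pvFoldl_append_singleton {α β : Type} (f : α → β) (xs : List α) (acc : List β) :
    xs.foldl (fun r x => r ++ [f x]) acc = acc ++ xs.map f := by
  induction xs generalizing acc with
  | nil => simp
  | cons x xs ih => simp [ih, List.append_assoc]

theorem pvFoldl_add {α : Type} (f : α → Int) (xs : List α) (init : Int) :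
    xs.foldl (fun r x => r + f x) init = init + (xs.map f).sum := by
  induction xs generalizing init with
  | nil => simp
  | cons x xs ih => simp [ih]; ring

theorem pvRange_map_getD (xs : List Int) :
    (List.range xs.length).map (fun k => xs.getD k 0) = xs := by
  apply List.ext_getElem (by simp)
  intro i h1 h2
  simp [List.getD, h2]

-- B's step, elementwise: for k < min lengths the zip-comprehension combines column k
theorem pvStep_getD (acc row : List Int) (ops : List String) (k : Nat)
    (hk : k < ops.length) (ha : acc.length = ops.length) (hr : ops.length ≤ row.length) :
    ((acc.zip (row.zip ops)).map
        (fun p => if p.2.2 = "*" then p.1 * p.2.1 else p.1 + p.2.1)).getD k 0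
      = pvCombine (ops.getD k "") (acc.getD k 0) (row.getD k 0) := by
  have hlen : ((acc.zip (row.zip ops)).map
      (fun p => if p.2.2 = "*" then p.1 * p.2.1 else p.1 + p.2.1)).length = ops.length := by
    simp [ha]; omega
  have hk' : k < ((acc.zip (row.zip ops)).map
      (fun p => if p.2.2 = "*" then p.1 * p.2.1 else p.1 + p.2.1)).length := by omega
  have h1 : k < acc.length := by omega
  have h2 : k < row.length := by omega
  simp [List.getD, List.getElem_zip, pvCombine, h1, h2, hk]

theorem pvStep_length (acc row : List Int) (ops : List String)
    (ha : acc.length = ops.length) (hr : ops.length ≤ row.length) :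
    ((acc.zip (row.zip ops)).map
        (fun p => if p.2.2 = "*" then p.1 * p.2.1 else p.1 + p.2.1)).length = ops.length := by
  simp [ha]; omega

-- MAIN INVARIANT: B's row-major fold equals, per column, the fold over that column
theorem pvMain (rows : List (List Int)) (ops : List String) (acc : List Int)
    (ha : acc.length = ops.length) (hr : ∀ r ∈ rows, ops.length ≤ r.length) :
    rows.foldl
      (fun a row =>
        (a.zip (row.zip ops)).map (fun p => if p.2.2 = "*" then p.1 * p.2.1 else p.1 + p.2.1))
      acc
    = (List.range ops.length).map
        (fun k => rows.foldl (fun v r => pvCombine (ops.getD k "") v (r.getD k 0)) (acc.getD k 0)) := by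
  induction rows generalizing acc with
  | nil =>
    simp only [List.foldl_nil]
    have := pvRange_map_getD acc
    rw [← ha] at *
    exact (pvRange_map_getD acc).symm
  | cons row rows ih =>
    simp only [List.foldl_cons]
    rw [ih _ (pvStep_length acc row ops ha (hr row (by simp)))
        (fun r hrr => hr r (by simp [hrr]))]
    apply List.map_congr_left
    intro k hkmem
    have hk : k < ops.length := List.mem_range.mp hkmem
    rw [pvStep_getD acc row ops k hk ha (hr row (by simp))]

theorem solve_eq (input : List String) (hpre : Pre_solve input) :
    solve input = solve_alt input := by
  obtain ⟨hne, hints, hops, hlens⟩ := hpre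
  have hlast : PySem.List.pyGetD input (-1) "" = input.getLastD "" := by
    rw [PySem.List.pyGetD_neg_one input "" hne]
    exact pvGetLast_eq_getLastD input hne
  simp only [solve, solve_alt, PySem.List.slice_to_neg_one, hlast]
  set ops := pvTokens (input.getLastD "") with hopsdef
  set rows := input.dropLast.map pvParseRow with hrowsdef
  rw [pvFoldl_append_singleton pvParseRow input.dropLast []]
  simp only [List.nil_append]
  -- row lengths: parse keeps token count
  have hrlen : ∀ r ∈ rows, ops.length ≤ r.length := by
    intro r hrmem
    rw [hrowsdef] at hrmem
    obtain ⟨s, hs, rfl⟩ := List.mem_map.mp hrmem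
    simpa [pvParseRow] using hlens s hs
  -- A side: rewrite fold-of-adds as a sum over range
  rw [pvFoldl_add, PySem.List.pyRange_zero_nat, List.map_map]
  -- B side via the invariant
  rw [pvMain rows ops (ops.map pvInit) (by simp) hrlen]
  rw [zero_add]
  congr 1
  apply List.map_congr_left
  intro k hkmem
  have hk : k < ops.length := List.mem_range.mp hkmem
  -- the Int index coming from pyRange is the cast of k
  simp only [Function.comp]
  rw [PySem.List.pyGetD_natCast]
  -- column k of A
  rw [pvGetNumbers, ← hrowsdef]
  rw [pvFoldl_append_singleton (fun l => PySem.List.pyGetD l (k : Int) 0) rows []]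
  simp only [List.nil_append]
  have hcol : rows.map (fun l => PySem.List.pyGetD l (k : Int) 0)
      = rows.map (fun l => l.getD k 0) := by
    apply List.map_congr_left; intro l _; rw [PySem.List.pyGetD_natCast]
  rw [hcol]
  -- acc0 at k
  have hacc0 : (ops.map pvInit).getD k 0 = pvInit (ops.getD k "") := by
    simp [List.getD, hk]
  rw [hacc0]
  -- split on the operation
  have hmem : ops.getD k "" ∈ ops := by
    have h := List.getElem_mem hk
    rw [List.getD_eq_getElem?_getD, List.getElem?_eq_getElem hk]
    exact h
  rcases hops (ops.getD k "") hmem with hop | hop <;>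
    rw [hop] <;>
    simp [pvCalculate, pvInit, pvCombine, pvMultiply, pvAdd, List.foldl_map]

-- ===== VERDICT (by name: the statement is the Claim_ definition above) =====
theorem solve_spec : Claim_equal_solve := by
  intro input _ hpre
  unfold Spec_solve
  exact solve_eq input hpre
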